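-- pv_equiv track=rewrite | github.com/duartebarbosadev/PhotoSort | src/ui/controllers/navigation_controller.py | navigate_linear
-- ===== SOURCE A (Python) =====
-- from typing import List, Optional, Iterable, Protocol, Set
--
-- def navigate_linear(
--     all_visible: List[str],
--     current: Optional[str],
--     direction: str,
--     skip_deleted: bool,
--     deleted_set: Set[str],
-- ) -> Optional[str]:
--     if not all_visible:
--         return None
--     if current not in all_visible:
--         return all_visible[0] if direction == "down" else all_visible[-1]
--     idx = all_visible.index(current)
--     step = -1 if direction in ("up", "left") else 1
--     while True:
--         idx += step
--         if idx < 0 or idx >= len(all_visible):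
--             return None
--         candidate = all_visible[idx]
--         if not skip_deleted or candidate not in deleted_set:
--             return candidate
-- ===== SOURCE B (Python) =====
-- def navigate_linear(all_visible, current, direction, skip_deleted, deleted_set):
--     if not all_visible:
--         return None
--     backwards = direction in ("up", "left")
--     ok = lambda x: not skip_deleted or x not in deleted_set
--     it = iter(all_visible)
--     prev = None  # last acceptable element seen before current (backward case)
--     for x in it:
--         if x == current:
--             if backwards:
--                 return prev
--             return next(filter(ok, it), None)
--         if backwards and ok(x):
--             prev = x
--     # current never seen: fall back to an end of the list
--     return all_visible[0] if direction == "down" else all_visible[-1]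
-- ===== Notes on version B (the rewrite author's own statement) =====
-- stated objective: alternative
-- what changed: Replaces A's three partial scans (membership test, .index, then a step/while index walk with bounds checks) by a single forward pass over one iterator: a state machine that remembers the last acceptable element before current and, on reaching current, returns that memory (backward) or the first acceptable element of the remaining iterator (forward); falling off the end means current was absent.
import Mathlib
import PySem

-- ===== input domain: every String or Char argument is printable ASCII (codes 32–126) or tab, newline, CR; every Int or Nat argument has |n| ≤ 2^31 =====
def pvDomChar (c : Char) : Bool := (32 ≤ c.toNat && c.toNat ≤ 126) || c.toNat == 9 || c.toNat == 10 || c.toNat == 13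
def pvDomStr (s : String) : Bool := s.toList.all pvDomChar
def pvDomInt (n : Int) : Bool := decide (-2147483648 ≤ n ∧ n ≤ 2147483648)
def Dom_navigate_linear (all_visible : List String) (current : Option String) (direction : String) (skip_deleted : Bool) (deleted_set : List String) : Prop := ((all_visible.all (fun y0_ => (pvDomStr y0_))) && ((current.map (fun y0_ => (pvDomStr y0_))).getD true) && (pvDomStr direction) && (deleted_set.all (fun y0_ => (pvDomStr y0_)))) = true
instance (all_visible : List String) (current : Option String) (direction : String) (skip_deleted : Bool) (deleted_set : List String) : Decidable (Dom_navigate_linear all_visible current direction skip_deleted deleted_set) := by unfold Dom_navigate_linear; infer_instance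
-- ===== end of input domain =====

-- B replaces A's membership test + .index + step/while index walk by one single forward
-- pass: a state machine remembering the last acceptable element before current; same cost.

-- ===== PORT A =====
-- A's 'while True' loop: idx += step; bounds check; candidate test.  Fuel = length+1
-- bounds the iteration count (the loop moves idx by ±1 and stops once out of range,
-- so fuel is never exhausted when started in range with fuel > length).
def navLoopA (l : List String) (skip_deleted : Bool) (deleted_set : List String)
    (step : Int) : Int → Nat → Option String
  | _, 0 => none
  | idx, Nat.succ fuel =>
    let idx' := idx + step
    if idx' < 0 ∨ (l.length : Int) ≤ idx' then none
    else
      match PySem.List.pyGet? l idx' with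
      | none => none
      | some candidate =>
        if !skip_deleted || !deleted_set.contains candidate then some candidate
        else navLoopA l skip_deleted deleted_set step idx' fuel

def navigate_linear (all_visible : List String) (current : Option String) (direction : String) (skip_deleted : Bool) (deleted_set : List String) : Option String :=
  if all_visible = [] then none
  else
    let memb : Bool := match current with | some c => all_visible.contains c | none => false
    if !memb then (if direction = "down" then all_visible.head? else all_visible.getLast?)
    else
      let c := match current with | some c => c | none => ""
      let idx : Int := ((PySem.List.index? all_visible c).getD 0 : Nat)
      let step : Int := if direction = "up" ∨ direction = "left" then -1 else 1
      navLoopA all_visible skip_deleted deleted_set step idx (all_visible.length + 1)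

-- ===== PORT B =====
-- B's single for-loop over the shared iterator, with accumulator `prev`.
-- Result: some r = loop returned r on hitting current; none = iterator exhausted.
def navScanB (cur : Option String) (bw : Bool) (ok : String → Bool) :
    List String → Option String → Option (Option String)
  | [], _ => none
  | x :: xs, prev =>
    if some x = cur then
      some (if bw then prev else xs.find? ok)   -- next(filter(ok, it), None)
    else
      navScanB cur bw ok xs (if bw && ok x then some x else prev)

def navigate_linear_alt (all_visible : List String) (current : Option String) (direction : String) (skip_deleted : Bool) (deleted_set : List String) : Option String :=
  if all_visible = [] then none
  else
    let bw := direction = "up" ∨ direction = "left"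
    let ok := fun x => !skip_deleted || !deleted_set.contains x
    match navScanB current bw ok all_visible none with
    | some r => r
    | none => if direction = "down" then all_visible.head? else all_visible.getLast?

-- ===== PRECONDITION & SPEC =====
def Spec_navigate_linear (all_visible : List String) (current : Option String) (direction : String) (skip_deleted : Bool) (deleted_set : List String) (out : Option String) : Prop := out = navigate_linear_alt all_visible current direction skip_deleted deleted_set
instance (all_visible : List String) (current : Option String) (direction : String) (skip_deleted : Bool) (deleted_set : List String) (out : Option String) : Decidable (Spec_navigate_linear all_visible current direction skip_deleted deleted_set out) := by unfold Spec_navigate_linear; infer_instance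

-- ===== CLAIM (what is proved, stated in full; the proofs are below) =====
def Claim_equal_navigate_linear : Prop := ∀ (all_visible : List String) (current : Option String) (direction : String) (skip_deleted : Bool) (deleted_set : List String), Dom_navigate_linear all_visible current direction skip_deleted deleted_set → Spec_navigate_linear all_visible current direction skip_deleted deleted_set (navigate_linear all_visible current direction skip_deleted deleted_set)

-- ===== LEMMAS AND PROOFS =====

-- A's loop with step +1 started at idx scans exactly the suffix after idx.
theorem navLoopA_down (l : List String) (sd : Bool) (del : List String) :
    ∀ (fuel : Nat) (idx : Nat), l.length - idx ≤ fuel →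
      navLoopA l sd del 1 idx fuel
        = (l.drop (idx + 1)).find? (fun x => !sd || !del.contains x) := by
  intro fuel
  induction fuel with
  | zero =>
    intro idx h
    have : l.length ≤ idx := by omega
    simp [navLoopA, List.drop_eq_nil_of_le (by omega : l.length ≤ idx + 1)]
  | succ fuel ih =>
    intro idx h
    by_cases hlt : idx + 1 < l.length
    · have hget : PySem.List.pyGet? l ((idx : Int) + 1) = some l[idx + 1] := by
        have := PySem.List.pyGet?_natCast l (idx + 1)
        push_cast at this
        rw [this, List.getElem?_eq_getElem hlt]
      have hdrop : l.drop (idx + 1) = l[idx + 1] :: l.drop (idx + 2) := by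
        rw [List.drop_eq_getElem_cons hlt]
      rw [navLoopA]
      simp only [hget]
      rw [if_neg (by push_cast; omega)]
      by_cases hp : (!sd || !del.contains l[idx + 1]) = true
      · rw [if_pos hp, hdrop]; simp only [List.find?_cons, hp]
      · rw [if_neg hp, hdrop]; simp only [List.find?_cons, Bool.eq_false_iff.mpr hp]
        rw [show (idx : Int) + 1 = ((idx + 1 : Nat) : Int) by push_cast; ring]
        rw [ih (idx + 1) (by omega)]
    · rw [navLoopA]
      rw [if_pos (by push_cast; omega)]
      rw [List.drop_eq_nil_of_le (by omega : l.length ≤ idx + 1)]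
      rfl

-- A's loop with step -1 started at idx scans exactly the reversed prefix before idx.
theorem navLoopA_up (l : List String) (sd : Bool) (del : List String) :
    ∀ (idx : Nat) (fuel : Nat), idx < l.length → idx < fuel →
      navLoopA l sd del (-1) idx fuel
        = ((l.take idx).reverse).find? (fun x => !sd || !del.contains x) := by
  intro idx
  induction idx with
  | zero =>
    intro fuel _ hf
    obtain ⟨fuel', rfl⟩ : ∃ k, fuel = k + 1 := ⟨fuel - 1, by omega⟩
    rw [navLoopA]
    simp
  | succ j ih =>
    intro fuel hlen hf
    obtain ⟨fuel', rfl⟩ : ∃ k, fuel = k + 1 := ⟨fuel - 1, by omega⟩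
    have hj : j < l.length := by omega
    have hget : PySem.List.pyGet? l ((j + 1 : Nat) + (-1) : Int) = some l[j] := by
      have := PySem.List.pyGet?_natCast l j
      rw [show ((j + 1 : Nat) + (-1) : Int) = (j : Int) by push_cast; ring]
      rw [this, List.getElem?_eq_getElem hj]
    have htake : (l.take (j + 1)).reverse = l[j] :: (l.take j).reverse := by
      rw [List.take_add_one, List.getElem?_eq_getElem hj]
      simp
    rw [navLoopA]
    simp only [hget]
    rw [if_neg (by push_cast; omega)]
    by_cases hp : (!sd || !del.contains l[j]) = true
    · rw [if_pos hp, htake]; simp only [List.find?_cons, hp]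
    · rw [if_neg hp, htake]; simp only [List.find?_cons, Bool.eq_false_iff.mpr hp]
      rw [show ((j + 1 : Nat) + (-1) : Int) = ((j : Nat) : Int) by push_cast; ring]
      rw [ih fuel' hj (by omega)]

-- B's scan returns none exactly when current matches no element.
theorem navScanB_none (cur : Option String) (bw : Bool) (ok : String → Bool) :
    ∀ (l : List String) (prev : Option String),
      (∀ x ∈ l, some x ≠ cur) → navScanB cur bw ok l prev = none := by
  intro l
  induction l with
  | nil => intro prev _; rfl
  | cons x xs ih =>
    intro prev h
    rw [navScanB, if_neg (h x (List.mem_cons_self))]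
    exact ih _ (fun y hy => h y (List.mem_cons_of_mem _ hy))

-- B's scan with current's first occurrence at index i returns the reversed-prefix
-- first match (seeded with prev) backwards, else the suffix first match.
theorem navScanB_found (c : String) (bw : Bool) (ok : String → Bool) :
    ∀ (l : List String) (i : Nat) (prev : Option String),
      PySem.List.index? l c = some i →
      navScanB (some c) bw ok l prev
        = some (if bw then (((l.take i).reverse).find? ok).or prev
                else (l.drop (i + 1)).find? ok) := by
  intro l
  induction l with
  | nil => intro i prev h; simp [PySem.List.index?] at h
  | cons x xs ih =>
    intro i prev h
    by_cases hx : x = c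
    · subst hx
      rw [PySem.List.index?_cons_self] at h
      have hi : i = 0 := by injection h with h'; omega
      subst hi
      rw [navScanB, if_pos rfl]
      simp
    · have hxs : ∃ j, PySem.List.index? xs c = some j ∧ i = j + 1 := by
        rw [PySem.List.index?_cons_of_ne xs hx] at h
        cases hj : PySem.List.index? xs c with
        | none => rw [hj] at h; simp at h
        | some j => rw [hj] at h; refine ⟨j, rfl, ?_⟩; simp at h; omega
      obtain ⟨j, hj, rfl⟩ := hxs
      rw [navScanB, if_neg (by simpa using Ne.symm (fun e => hx e.symm))]
      rw [ih j _ hj]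
      cases bw with
      | false => simp
      | true =>
        have htake : ((x :: xs).take (j + 1 + 1 - 1)).reverse
            = (xs.take j).reverse ++ [x] := by
          simp [List.take_succ_cons]
        simp only [Bool.true_and]
        congr 1
        rw [show (x :: xs).take (j + 1) = x :: xs.take j by simp [List.take_succ_cons],
            List.reverse_cons, List.find?_append]
        cases hok : ok x <;> simp [hok]

theorem navigate_linear_eq (l : List String) (current : Option String)
    (dir : String) (sd : Bool) (del : List String) :
    navigate_linear l current dir sd del = navigate_linear_alt l current dir sd del := by
  unfold navigate_linear navigate_linear_alt
  by_cases hnil : l = []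
  · simp [hnil]
  · simp only [if_neg hnil]
    cases current with
    | none =>
      rw [navScanB_none _ _ _ l none (fun x _ h => Option.some_ne_none x h)]
      simp
    | some c =>
      by_cases hc : c ∈ l
      · have hmemb : l.contains c = true := by simpa using hc
        simp only [hmemb, Bool.not_true, if_neg (by decide : ¬ (false = true))]
        obtain ⟨i, hi⟩ : ∃ i, PySem.List.index? l c = some i :=
          Option.isSome_iff_exists.mp ((PySem.List.index?_isSome_iff l c).mpr hc)
        obtain ⟨hilen, -, -⟩ := PySem.List.getElem_of_index?_eq_some hi
        simp only [hi, Option.getD_some]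
        rw [navScanB_found c _ _ l i none hi]
        by_cases hd : dir = "up" ∨ dir = "left"
        · rw [if_pos hd, navLoopA_up l sd del i (l.length + 1) hilen (by omega)]
          simp [hd]
        · rw [if_neg hd, navLoopA_down l sd del (l.length + 1) i (by omega)]
          simp [hd]
      · have hmemb : l.contains c = false := by simpa using hc
        simp only [hmemb]
        rw [navScanB_none _ _ _ l none
          (fun x hx he => hc (by injection he with h'; exact h' ▸ hx))]
        simp
-- ===== VERDICT (by name: the statement is the Claim_ definition above) =====
theorem navigate_linear_spec : Claim_equal_navigate_linear := by
  intro l current dir sd del _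
  exact navigate_linear_eq l current dir sd del
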